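-- pv_equiv track=rewrite | github.com/leeguooooo/prompt-language-coach | scripts/manage_language_coach.py | _merge_estimates
-- ===== SOURCE A (Python) =====
-- def _merge_estimates(
--     current: list[dict[str, str]], incoming: list[dict[str, str]]
-- ) -> list[dict[str, str]]:
--     merged: dict[str, dict[str, str]] = {}
--
--     for record in current + incoming:
--         date_key = record.get("date", "")
--         if not date_key:
--             continue
--         estimate_value = record.get("estimate")
--         if estimate_value is None:
--             estimate_value = record.get("band")
--         normalized_record = {"date": date_key}
--         if estimate_value is not None:
--             normalized_record["estimate"] = estimate_value
--         if record.get("text"):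
--             normalized_record["text"] = record["text"]
--         existing = merged.get(date_key)
--         if existing is None:
--             merged[date_key] = normalized_record
--             continue
--         if normalized_record.get("text") and not existing.get("text"):
--             merged[date_key] = normalized_record
--
--     return [merged[key] for key in sorted(merged.keys())]
-- ===== SOURCE B (Python) =====
-- def _normalize(record):
--     """Return the normalized record, or None when the date is missing/empty."""
--     date_key = record.get("date", "")
--     if not date_key:
--         return None
--     estimate_value = record.get("estimate")
--     if estimate_value is None:
--         estimate_value = record.get("band")
--     normalized = {"date": date_key}
--     if estimate_value is not None:
--         normalized["estimate"] = estimate_value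
--     if record.get("text"):
--         normalized["text"] = record["text"]
--     return normalized
--
--
-- def _merge_estimates(
--     current: list[dict[str, str]], incoming: list[dict[str, str]]
-- ) -> list[dict[str, str]]:
--     records = [n for n in map(_normalize, current + incoming) if n is not None]
--     result = []
--     for date_key in sorted({r["date"] for r in records}):
--         best = None
--         for r in records:
--             if r["date"] != date_key:
--                 continue
--             if best is None or (r.get("text") and not best.get("text")):
--                 best = r
--         result.append(best)
--     return result
-- ===== Notes on version B (the rewrite author's own statement) =====
-- stated objective: alternative
-- what changed: A interleaves normalization with in-place updates of a date-keyed dict and sorts the keys at the end; B normalizes once into a list, then walks the sorted distinct dates and picks each date's surviving record by a single reduction scan, with no dict at all.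
import Mathlib
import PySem

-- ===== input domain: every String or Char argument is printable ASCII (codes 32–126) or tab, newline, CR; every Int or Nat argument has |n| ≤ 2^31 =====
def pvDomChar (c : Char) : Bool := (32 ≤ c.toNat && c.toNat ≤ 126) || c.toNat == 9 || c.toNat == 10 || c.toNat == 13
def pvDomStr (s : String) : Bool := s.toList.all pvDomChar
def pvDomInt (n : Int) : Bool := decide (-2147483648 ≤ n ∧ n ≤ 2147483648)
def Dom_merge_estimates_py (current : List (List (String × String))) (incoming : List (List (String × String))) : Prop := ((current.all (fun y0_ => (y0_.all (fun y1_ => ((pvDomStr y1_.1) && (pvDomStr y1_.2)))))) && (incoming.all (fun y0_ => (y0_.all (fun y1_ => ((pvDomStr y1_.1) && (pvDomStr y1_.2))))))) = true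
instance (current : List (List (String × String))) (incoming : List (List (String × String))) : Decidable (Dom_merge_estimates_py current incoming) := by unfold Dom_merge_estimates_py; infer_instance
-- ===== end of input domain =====

-- B merges without a dict: it normalizes once, then walks the sorted distinct dates and
-- reduces each date's records in one scan (same return value; A mutates nothing observable).

-- ===== PORT A =====
-- Records (Python dicts) arrive as association lists; each is read through
-- PySem.Dict.ofList so that .get mirrors Python dict lookup exactly.
def merge_estimates_py (current : List (List (String × String))) (incoming : List (List (String × String))) : List (List (String × String)) :=
  let merged : PySem.Dict String (PySem.Dict String String) :=
    (current ++ incoming).foldl (fun merged record =>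
      let rec_ := PySem.Dict.ofList record
      let date_key := rec_.getD "date" ""
      if date_key = "" then merged
      else
        let estimate_value : Option String :=
          match rec_.get? "estimate" with
          | some v => some v
          | none => rec_.get? "band"
        let normalized_record : PySem.Dict String String :=
          PySem.Dict.insert PySem.Dict.empty "date" date_key
        let normalized_record :=
          match estimate_value with
          | some v => normalized_record.insert "estimate" v
          | none => normalized_record
        let normalized_record :=
          if rec_.getD "text" "" ≠ "" then normalized_record.insert "text" (rec_.getD "text" "")
          else normalized_record
        match merged.get? date_key with
        | none => merged.insert date_key normalized_record
        | some existing =>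
          if normalized_record.getD "text" "" ≠ "" ∧ existing.getD "text" "" = "" then
            merged.insert date_key normalized_record
          else merged)
      PySem.Dict.empty
  -- merged[key]: the key comes from merged.keys, so the .getD default is unreachable
  (PySem.List.sorted merged.keys (fun k => k) false).map (fun key => (merged.getD key PySem.Dict.empty).items)

-- ===== PORT B =====
def pv_normalize (record : List (String × String)) : Option (PySem.Dict String String) :=
  let rec_ := PySem.Dict.ofList record
  let date_key := rec_.getD "date" ""
  if date_key = "" then none
  else
    let estimate_value : Option String :=
      match rec_.get? "estimate" with
      | some v => some v
      | none => rec_.get? "band"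
    let normalized : PySem.Dict String String :=
      PySem.Dict.insert PySem.Dict.empty "date" date_key
    let normalized :=
      match estimate_value with
      | some v => normalized.insert "estimate" v
      | none => normalized
    let normalized :=
      if rec_.getD "text" "" ≠ "" then normalized.insert "text" (rec_.getD "text" "")
      else normalized
    some normalized

def merge_estimates_py_alt (current : List (List (String × String))) (incoming : List (List (String × String))) : List (List (String × String)) :=
  let records := ((current ++ incoming).map pv_normalize).filterMap id
  let dates := PySem.List.sorted (PySem.Set.ofList (records.map (fun r => r.getD "date" ""))) (fun k => k) false
  dates.map (fun date_key =>
    let best : Option (PySem.Dict String String) :=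
      records.foldl (fun best r =>
        if r.getD "date" "" = date_key then
          match best with
          | none => some r
          | some b => if r.getD "text" "" ≠ "" ∧ b.getD "text" "" = "" then some r else some b
        else best) none
    -- best is not None: date_key occurs among the records
    (best.getD PySem.Dict.empty).items)

-- ===== PRECONDITION & SPEC =====
def Spec_merge_estimates_py (current : List (List (String × String))) (incoming : List (List (String × String))) (out : List (List (String × String))) : Prop := out = merge_estimates_py_alt current incoming
instance (current : List (List (String × String))) (incoming : List (List (String × String))) (out : List (List (String × String))) : Decidable (Spec_merge_estimates_py current incoming out) := by unfold Spec_merge_estimates_py; infer_instance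

-- ===== CLAIM (what is proved, stated in full; the proofs are below) =====
def Claim_equal_merge_estimates_py : Prop := ∀ (current : List (List (String × String))) (incoming : List (List (String × String))), Dom_merge_estimates_py current incoming → Spec_merge_estimates_py current incoming (merge_estimates_py current incoming)

-- ===== LEMMAS AND PROOFS =====

-- The per-date reduction step shared by the two proofs (B's inner branch).
def pvRStep (best : Option (PySem.Dict String String)) (r : PySem.Dict String String) : Option (PySem.Dict String String) :=
  match best with
  | none => some r
  | some b => if r.getD "text" "" ≠ "" ∧ b.getD "text" "" = "" then some r else some b

-- A's dict-update step, phrased on an already-normalized record.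
def pvDStep (m : PySem.Dict String (PySem.Dict String String)) (n : PySem.Dict String String) : PySem.Dict String (PySem.Dict String String) :=
  match m.get? (n.getD "date" "") with
  | none => m.insert (n.getD "date" "") n
  | some existing =>
    if n.getD "text" "" ≠ "" ∧ existing.getD "text" "" = "" then m.insert (n.getD "date" "") n
    else m

-- A's loop body is: normalize, then (when the date is nonempty) pvDStep.
theorem pv_stepA_funext :
    (fun (merged : PySem.Dict String (PySem.Dict String String)) (record : List (String × String)) =>
      let rec_ := PySem.Dict.ofList record
      let date_key := rec_.getD "date" ""
      if date_key = "" then merged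
      else
        let estimate_value : Option String :=
          match rec_.get? "estimate" with
          | some v => some v
          | none => rec_.get? "band"
        let normalized_record : PySem.Dict String String :=
          PySem.Dict.insert PySem.Dict.empty "date" date_key
        let normalized_record :=
          match estimate_value with
          | some v => normalized_record.insert "estimate" v
          | none => normalized_record
        let normalized_record :=
          if rec_.getD "text" "" ≠ "" then normalized_record.insert "text" (rec_.getD "text" "")
          else normalized_record
        match merged.get? date_key with
        | none => merged.insert date_key normalized_record
        | some existing =>
          if normalized_record.getD "text" "" ≠ "" ∧ existing.getD "text" "" = "" then
            merged.insert date_key normalized_record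
          else merged)
    = fun m record =>
        match pv_normalize record with
        | none => m
        | some n => pvDStep m n := by
  funext m record
  simp only [pv_normalize]
  by_cases hd : (PySem.Dict.ofList record).getD "date" "" = ""
  · simp [hd]
  · simp only [hd, if_false]
    cases hev : (match (PySem.Dict.ofList record).get? "estimate" with
        | some v => some v
        | none => (PySem.Dict.ofList record).get? "band") with
    | none =>
      by_cases ht : (PySem.Dict.ofList record).getD "text" "" = ""
      · simp [ht, pvDStep, PySem.Dict.getD_insert]
      · simp [ht, pvDStep, PySem.Dict.getD_insert]
    | some v =>
      by_cases ht : (PySem.Dict.ofList record).getD "text" "" = ""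
      · simp [ht, pvDStep, PySem.Dict.getD_insert]
      · simp [ht, pvDStep, PySem.Dict.getD_insert]

theorem pv_foldA_eq (l : List (List (String × String))) (m : PySem.Dict String (PySem.Dict String String)) :
    l.foldl (fun m record =>
        match pv_normalize record with
        | none => m
        | some n => pvDStep m n) m
    = (l.filterMap pv_normalize).foldl pvDStep m := by
  induction l generalizing m with
  | nil => rfl
  | cons r t ih =>
    rw [List.foldl_cons, List.filterMap_cons]
    cases pv_normalize r with
    | none => exact ih m
    | some n => rw [List.foldl_cons]; exact ih (pvDStep m n)

-- Lookup after A's merge loop = B's per-date reduction over the normalized records with that date.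
theorem pv_get_fold (ns : List (PySem.Dict String String)) (m : PySem.Dict String (PySem.Dict String String)) (d : String) :
    (ns.foldl pvDStep m).get? d
    = (ns.filter (fun n => n.getD "date" "" = d)).foldl pvRStep (m.get? d) := by
  induction ns generalizing m with
  | nil => rfl
  | cons n t ih =>
    rw [List.foldl_cons, List.filter_cons]
    by_cases hd : n.getD "date" "" = d
    · simp only [hd, decide_true, if_true, List.foldl_cons, ih]
      congr 1
      subst hd
      unfold pvDStep pvRStep
      cases hm : m.get? (n.getD "date" "") with
      | none => simp [PySem.Dict.get?_insert_self]
      | some ex =>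
        simp only [hm]
        split
        · simp [PySem.Dict.get?_insert_self]
        · simp [hm]
    · simp only [hd, decide_false, if_false] ; rw [ih]
      congr 1
      unfold pvDStep
      cases m.get? (n.getD "date" "") with
      | none => exact PySem.Dict.get?_insert_of_ne _ _ (Ne.symm hd)
      | some ex =>
        by_cases hc : n.getD "text" "" ≠ "" ∧ ex.getD "text" "" = ""
        · simp only [if_pos hc]
          exact PySem.Dict.get?_insert_of_ne _ _ (Ne.symm hd)
        · simp only [if_neg hc]

-- Keys of A's dict: membership and uniqueness.
theorem pv_mem_keys_fold (ns : List (PySem.Dict String String)) (m : PySem.Dict String (PySem.Dict String String)) (k : String) :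
    k ∈ (ns.foldl pvDStep m).keys ↔ k ∈ m.keys ∨ k ∈ ns.map (fun n => n.getD "date" "") := by
  induction ns generalizing m with
  | nil => simp
  | cons n t ih =>
    rw [List.foldl_cons, ih, List.map_cons]
    have hstep : k ∈ (pvDStep m n).keys ↔ k ∈ m.keys ∨ k = n.getD "date" "" := by
      unfold pvDStep
      cases hm : m.get? (n.getD "date" "") with
      | none => simp [PySem.Dict.mem_keys_insert, or_comm]
      | some ex =>
        have hmem : n.getD "date" "" ∈ m.keys :=
          PySem.Dict.mem_keys_of_mem_items m (PySem.Dict.mem_items_of_get?_eq_some m hm)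
        by_cases hc : n.getD "text" "" ≠ "" ∧ ex.getD "text" "" = ""
        · simp only [if_pos hc, PySem.Dict.mem_keys_insert]
          constructor
          · rintro (h | h)
            · exact Or.inl (h ▸ hmem)
            · exact Or.inl h
          · rintro (h | h)
            · exact Or.inr h
            · exact Or.inl h
        · simp only [if_neg hc]
          constructor
          · exact fun h => Or.inl h
          · rintro (h | h)
            · exact h
            · exact h ▸ hmem
    rw [hstep]
    simp only [List.mem_cons]
    tauto

theorem pv_nodup_keys_fold (ns : List (PySem.Dict String String)) (m : PySem.Dict String (PySem.Dict String String))
    (h : m.keys.Nodup) : (ns.foldl pvDStep m).keys.Nodup := by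
  induction ns generalizing m with
  | nil => exact h
  | cons n t ih =>
    rw [List.foldl_cons]
    apply ih
    unfold pvDStep
    cases m.get? (n.getD "date" "") with
    | none => exact PySem.Dict.nodup_keys_insert _ _ _ h
    | some ex =>
      by_cases hc : n.getD "text" "" ≠ "" ∧ ex.getD "text" "" = ""
      · simp only [if_pos hc]
        exact PySem.Dict.nodup_keys_insert _ _ _ h
      · simp only [if_neg hc]
        exact h

-- B's fused scan = reduce over the filtered group.
theorem pv_scan_eq (ns : List (PySem.Dict String String)) (d : String) :
    ns.foldl (fun best r =>
        if r.getD "date" "" = d then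
          match best with
          | none => some r
          | some b => if r.getD "text" "" ≠ "" ∧ b.getD "text" "" = "" then some r else some b
        else best) none
    = (ns.filter (fun n => n.getD "date" "" = d)).foldl pvRStep none := by
  exact PySem.List.foldl_ite_eq_foldl_filter (p := fun r => r.getD "date" "" = d) (f := pvRStep) (l := ns) (init := none)

-- ===== VERDICT (by name: the statement is the Claim_ definition above) =====
theorem merge_estimates_py_spec : Claim_equal_merge_estimates_py := by
  intro current incoming _
  unfold Spec_merge_estimates_py merge_estimates_py merge_estimates_py_alt
  simp only [List.filterMap_map, Function.id_comp]
  rw [pv_stepA_funext, pv_foldA_eq]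
  have hkeys : PySem.List.sorted ((((current ++ incoming).filterMap pv_normalize).foldl pvDStep PySem.Dict.empty).keys) (fun k => k) false
      = PySem.List.sorted (PySem.Set.ofList (((current ++ incoming).filterMap pv_normalize).map (fun r => r.getD "date" ""))) (fun k => k) false := by
    apply (PySem.List.sorted_id_eq_sorted_id_iff_perm _ _).mpr
    apply (List.perm_ext_iff_of_nodup (pv_nodup_keys_fold _ _ (by simp)) (PySem.Set.nodup_ofList _)).mpr
    intro k
    rw [PySem.Set.mem_ofList, pv_mem_keys_fold]
    simp [PySem.Dict.keys_empty]
  rw [hkeys]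
  apply List.map_congr_left
  intro d _
  rw [pv_scan_eq, PySem.Dict.getD_eq_get?_getD, pv_get_fold]
  rfl
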